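-- pv_equiv track=rewrite | github.com/Nikkuniku/AtcoderProgramming | Project Euler/113.py | Horizontal_Numberdigit
-- ===== SOURCE A (Python) =====
-- def Horizontal_Numberdigit(N):
--     L = len(N)
--     l = 0
--     r = 10
--     while r - l > 1:
--         mid = (l + r) // 2
--         temp = 0
--         for _ in range(L):
--             temp *= 10
--             temp += mid
--         if temp <= int(N):
--             l = mid
--         else:
--             r = mid
--     return l
-- ===== SOURCE B (Python) =====
-- def Horizontal_Numberdigit(N):
--     n = int(N)
--     rep = (10 ** len(N) - 1) // 9
--     return max(0, min(9, n // rep))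
-- ===== Notes on version B (the rewrite author's own statement) =====
-- stated objective: simpler
-- what changed: Replaced the digit-wise binary search over 0..9 (with an inner loop rebuilding the repeated-digit number each iteration) by a one-line closed form: clamp(int(N) // repunit(len(N)), 0, 9).
import Mathlib
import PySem

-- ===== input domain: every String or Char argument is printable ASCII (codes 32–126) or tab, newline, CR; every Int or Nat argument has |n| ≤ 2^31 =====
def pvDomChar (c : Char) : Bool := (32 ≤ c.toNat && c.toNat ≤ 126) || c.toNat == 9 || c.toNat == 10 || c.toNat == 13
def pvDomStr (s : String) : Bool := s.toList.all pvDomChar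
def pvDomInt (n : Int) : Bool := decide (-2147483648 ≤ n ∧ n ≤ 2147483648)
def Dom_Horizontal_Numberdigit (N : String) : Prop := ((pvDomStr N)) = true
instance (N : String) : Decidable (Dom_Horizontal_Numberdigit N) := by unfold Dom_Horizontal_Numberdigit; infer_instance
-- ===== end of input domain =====

-- B replaces A's digit-wise binary search with the closed form max(0, min(9, int(N) // repunit)): simpler.

-- ===== PORT A =====
-- while r - l > 1: mid = (l+r)//2; temp = digit-repeat of mid; move l or r
-- (fuel = 10 merely bounds the loop: the gap r - l starts at 10 and shrinks every iteration)
def HN_loop (n L : Int) : Nat → Int → Int → Int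
  | 0, l, _ => l
  | fuel + 1, l, r =>
    if r - l > 1 then
      let mid := PySem.Int.floordiv (l + r) 2
      let temp := List.foldl (fun t _ => t * 10 + mid) 0 (PySem.List.pyRange 0 L 1)
      if temp ≤ n then HN_loop n L fuel mid r else HN_loop n L fuel l mid
    else l

def Horizontal_Numberdigit (N : String) : Int :=
  let L := PySem.Str.len N
  -- int(N): ValueError (ofStr? = none) is excluded by Pre_; getD 0 is never reached there
  let n := (PySem.Int.ofStr? N).getD 0
  HN_loop n L 10 0 10

-- ===== PORT B =====
def Horizontal_Numberdigit_alt (N : String) : Int :=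
  let n := (PySem.Int.ofStr? N).getD 0
  -- 10 ** len(N): len N ≥ 0 always, so the toNat exponent is exact
  let rep := PySem.Int.floordiv (10 ^ (PySem.Str.len N).toNat - 1) 9
  max 0 (min 9 (PySem.Int.floordiv n rep))

-- ===== PRECONDITION & SPEC =====
-- Pre_ excludes exactly the inputs where Python's int(N) raises ValueError (both A and B raise there).
def Pre_Horizontal_Numberdigit (N : String) : Prop := (PySem.Int.ofStr? N).isSome = true
instance (N : String) : Decidable (Pre_Horizontal_Numberdigit N) := by unfold Pre_Horizontal_Numberdigit; infer_instance
def pvWitness_Horizontal_Numberdigit : String := "42"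

def Spec_Horizontal_Numberdigit (N : String) (out : Int) : Prop := out = Horizontal_Numberdigit_alt N
instance (N : String) (out : Int) : Decidable (Spec_Horizontal_Numberdigit N out) := by unfold Spec_Horizontal_Numberdigit; infer_instance

-- ===== CLAIM (what is proved, stated in full; the proofs are below) =====
def Claim_equal_Horizontal_Numberdigit : Prop := ∀ (N : String), Dom_Horizontal_Numberdigit N → Pre_Horizontal_Numberdigit N → Spec_Horizontal_Numberdigit N (Horizontal_Numberdigit N)

-- ===== LEMMAS AND PROOFS =====

-- the repunit 1…1 (L ones), as an Int
def repu : Nat → Int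
  | 0 => 0
  | L + 1 => repu L * 10 + 1

lemma repu_nonneg (L : Nat) : 0 ≤ repu L := by
  induction L with
  | zero => simp [repu]
  | succ L ih => simp [repu]; omega

lemma repu_pos (L : Nat) (h : 1 ≤ L) : 1 ≤ repu L := by
  cases L with
  | zero => omega
  | succ L => have := repu_nonneg L; simp [repu]; omega

lemma nine_mul_repu (L : Nat) : 9 * repu L = 10 ^ L - 1 := by
  induction L with
  | zero => simp [repu]
  | succ L ih => simp [repu, pow_succ]; ring_nf; ring_nf at ih; omega

-- A's inner for-loop computes mid * repunit L
lemma fold_repu_range (mid : Int) (L : Nat) (t : Int) :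
    List.foldl (fun t _ => t * 10 + mid) t (List.range L) = t * 10 ^ L + mid * repu L := by
  induction L generalizing t with
  | zero => simp [repu]
  | succ L ih =>
      rw [List.range_succ, List.foldl_append, ih]
      simp only [List.foldl_cons, List.foldl_nil, repu, pow_succ]
      ring

lemma fold_repu (mid : Int) (L : Nat) (t : Int) :
    List.foldl (fun t _ => t * 10 + mid) t (PySem.List.pyRange 0 (L : Int) 1) =
      t * 10 ^ L + mid * repu L := by
  rw [PySem.List.pyRange_one]
  have hL : ((L : Int) - 0).toNat = L := by omega
  rw [hL, List.foldl_map, fold_repu_range]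

-- clamp(n / R) picks out the binary-search answer
lemma clamp_leaf (n R d : Int) (hR : 1 ≤ R) (hd0 : 0 ≤ d) (hd9 : d ≤ 9)
    (h1 : d = 0 ∨ d * R ≤ n) (h2 : d = 9 ∨ n < (d + 1) * R) :
    max 0 (min 9 (n / R)) = d := by
  rcases h1 with h1 | h1 <;> rcases h2 with h2 | h2
  · omega
  · subst h1
    have : n / R < 1 := (Int.ediv_lt_iff_lt_mul (by omega)).2 (by omega)
    omega
  · subst h2
    have : 9 ≤ n / R := (Int.le_ediv_iff_mul_le (by omega)).2 (by omega)
    omega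
  · have hlo : d ≤ n / R := (Int.le_ediv_iff_mul_le (by omega)).2 h1
    have hhi : n / R < d + 1 := (Int.ediv_lt_iff_lt_mul (by omega)).2 h2
    omega

lemma HN_leaf (n L : Int) (fuel : Nat) (l r : Int) (h : ¬ r - l > 1) : HN_loop n L fuel l r = l := by
  cases fuel with
  | zero => rfl
  | succ fuel => rw [HN_loop, if_neg h]

lemma HN_step (n : Int) (L : Nat) (R : Int) (fuel : Nat) {l r : Int} (hrep : repu L = R)
    (h : r - l > 1) :
    HN_loop n (L : Int) (fuel + 1) l r =
      if (PySem.Int.floordiv (l + r) 2) * R ≤ n then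
        HN_loop n (L : Int) fuel (PySem.Int.floordiv (l + r) 2) r
      else HN_loop n (L : Int) fuel l (PySem.Int.floordiv (l + r) 2) := by
  rw [HN_loop, if_pos h]
  simp only [fold_repu, hrep, zero_mul, zero_add]

lemma loop_eq_clamp (n R : Int) (L : Nat) (hrep : repu L = R) (hR : 1 ≤ R) :
    HN_loop n (L : Int) 10 0 10 = max 0 (min 9 (n / R)) := by
  rw [show (10 : Nat) = 9 + 1 from rfl, HN_step n L R 9 hrep (by omega),
    show PySem.Int.floordiv (0 + 10) 2 = 5 from by decide]
  split_ifs with h5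
  · rw [show (9 : Nat) = 8 + 1 from rfl, HN_step n L R 8 hrep (by omega),
      show PySem.Int.floordiv (5 + 10) 2 = 7 from by decide]
    split_ifs with h7
    · rw [show (8 : Nat) = 7 + 1 from rfl, HN_step n L R 7 hrep (by omega),
        show PySem.Int.floordiv (7 + 10) 2 = 8 from by decide]
      split_ifs with h8
      · rw [show (7 : Nat) = 6 + 1 from rfl, HN_step n L R 6 hrep (by omega),
          show PySem.Int.floordiv (8 + 10) 2 = 9 from by decide]
        split_ifs with h9
        · rw [HN_leaf n L 6 9 10 (by omega)]
          exact (clamp_leaf n R 9 hR (by omega) (by omega) (Or.inr h9) (Or.inl rfl)).symm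
        · rw [HN_leaf n L 6 8 9 (by omega)]
          exact (clamp_leaf n R 8 hR (by omega) (by omega) (Or.inr h8) (Or.inr (by omega))).symm
      · rw [HN_leaf n L 7 7 8 (by omega)]
        exact (clamp_leaf n R 7 hR (by omega) (by omega) (Or.inr h7) (Or.inr (by omega))).symm
    · rw [show (8 : Nat) = 7 + 1 from rfl, HN_step n L R 7 hrep (by omega),
        show PySem.Int.floordiv (5 + 7) 2 = 6 from by decide]
      split_ifs with h6
      · rw [HN_leaf n L 7 6 7 (by omega)]
        exact (clamp_leaf n R 6 hR (by omega) (by omega) (Or.inr h6) (Or.inr (by omega))).symm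
      · rw [HN_leaf n L 7 5 6 (by omega)]
        exact (clamp_leaf n R 5 hR (by omega) (by omega) (Or.inr h5) (Or.inr (by omega))).symm
  · rw [show (9 : Nat) = 8 + 1 from rfl, HN_step n L R 8 hrep (by omega),
      show PySem.Int.floordiv (0 + 5) 2 = 2 from by decide]
    split_ifs with h2
    · rw [show (8 : Nat) = 7 + 1 from rfl, HN_step n L R 7 hrep (by omega),
        show PySem.Int.floordiv (2 + 5) 2 = 3 from by decide]
      split_ifs with h3
      · rw [show (7 : Nat) = 6 + 1 from rfl, HN_step n L R 6 hrep (by omega),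
          show PySem.Int.floordiv (3 + 5) 2 = 4 from by decide]
        split_ifs with h4
        · rw [HN_leaf n L 6 4 5 (by omega)]
          exact (clamp_leaf n R 4 hR (by omega) (by omega) (Or.inr h4) (Or.inr (by omega))).symm
        · rw [HN_leaf n L 6 3 4 (by omega)]
          exact (clamp_leaf n R 3 hR (by omega) (by omega) (Or.inr h3) (Or.inr (by omega))).symm
      · rw [HN_leaf n L 7 2 3 (by omega)]
        exact (clamp_leaf n R 2 hR (by omega) (by omega) (Or.inr h2) (Or.inr (by omega))).symm
    · rw [show (8 : Nat) = 7 + 1 from rfl, HN_step n L R 7 hrep (by omega),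
        show PySem.Int.floordiv (0 + 2) 2 = 1 from by decide]
      split_ifs with h1
      · rw [HN_leaf n L 7 1 2 (by omega)]
        exact (clamp_leaf n R 1 hR (by omega) (by omega) (Or.inr (by omega)) (Or.inr (by omega))).symm
      · rw [HN_leaf n L 7 0 1 (by omega)]
        exact (clamp_leaf n R 0 hR (by omega) (by omega) (Or.inl rfl) (Or.inr (by omega))).symm

theorem Horizontal_Numberdigit_spec : Claim_equal_Horizontal_Numberdigit := by
  intro N _ hpre
  unfold Spec_Horizontal_Numberdigit Horizontal_Numberdigit Horizontal_Numberdigit_alt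
  have hlen : PySem.Str.len N = ((N.toList.length : Nat) : Int) := PySem.Str.len_eq N
  have hne : N.toList ≠ [] := by
    intro h
    have hnone : PySem.Int.ofStr? N = none := by
      simp only [PySem.Int.ofStr?, h]
      decide
    simp [Pre_Horizontal_Numberdigit, hnone] at hpre
  have hL1 : 1 ≤ N.toList.length := by
    cases h : N.toList with
    | nil => exact absurd h hne
    | cons a l => simp

  set L := N.toList.length with hLdef
  have hR : 1 ≤ repu L := repu_pos L hL1
  simp only [hlen]
  have hrepval : PySem.Int.floordiv (10 ^ (((L : Int)).toNat) - 1) 9 = repu L := by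
    have ht : ((L : Int)).toNat = L := by omega
    rw [ht, ← nine_mul_repu L, PySem.Int.floordiv_eq_ediv_of_pos (by omega)]
    exact Int.mul_ediv_cancel_left (repu L) (by norm_num)
  rw [hrepval, loop_eq_clamp _ (repu L) L rfl hR,
    PySem.Int.floordiv_eq_ediv_of_pos (by omega)]
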